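-- pv_equiv track=rewrite | github.com/susam/lab | algo/pramp/deletion_distance_dp.py | deletion_distance
-- ===== SOURCE A (Python) =====
-- def deletion_distance(a, b):
--     m, n = len(a), len(b)
--
--     # m x n matrix
--     memo = [[0] * (n + 1) for row in range(m + 1)]
--
--     for i in range(m + 1):
--         for j in range(n + 1):
--             if i == 0:
--                 memo[i][j] = j
--             elif j == 0:
--                 memo[i][j] = i
--             elif a[i - 1] == b[j - 1]:
--                 memo[i][j] = memo[i - 1][j - 1]
--             else:
--                 memo[i][j] = 1 + min(memo[i - 1][j], memo[i][j - 1])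
--
--     return memo[m][n]
-- ===== SOURCE B (Python) =====
-- def deletion_distance(a, b):
--     # LCS length via a rolling row, inner pass zipping b with adjacent pairs of
--     # the previous row; close with len(a) + len(b) - 2*LCS.
--     prev = [0] * (len(b) + 1)
--     for ca in a:
--         left = 0
--         row = [0]
--         for cb, diag, up in zip(b, prev, prev[1:]):
--             left = diag + 1 if cb == ca else max(up, left)
--             row.append(left)
--         prev = row
--     return len(a) + len(b) - 2 * prev[-1]
-- ===== Notes on version B (the rewrite author's own statement) =====
-- stated objective: faster
-- what changed: B computes the longest-common-subsequence length with a rolling-row max-DP (inner pass folding over b zipped with adjacent pairs of the previous row) and returns len(a)+len(b)-2*LCS, instead of A's full (m+1)x(n+1) min-deletions table; O(n) rather than O(m*n) space and no index arithmetic.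
import Mathlib
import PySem

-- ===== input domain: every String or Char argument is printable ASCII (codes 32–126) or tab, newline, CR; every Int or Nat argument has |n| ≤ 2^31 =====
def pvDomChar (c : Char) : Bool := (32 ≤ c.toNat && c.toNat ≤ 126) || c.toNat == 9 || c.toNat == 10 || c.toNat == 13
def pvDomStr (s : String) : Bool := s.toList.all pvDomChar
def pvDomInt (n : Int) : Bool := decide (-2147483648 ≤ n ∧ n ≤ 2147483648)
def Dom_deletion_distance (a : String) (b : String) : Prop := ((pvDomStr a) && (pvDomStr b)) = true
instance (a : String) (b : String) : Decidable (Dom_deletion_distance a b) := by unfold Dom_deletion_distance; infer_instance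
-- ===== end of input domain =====

-- B replaces A's full min-deletions table by a rolling-row LCS fold closed with len(a)+len(b)-2*LCS (alternative decomposition, same O(mn) cost).

-- ===== PORT A =====
-- row i=0 of A's memo: memo[0][j] = j
def rowZeroA : List Char → Int → List Int
  | [], j => [j]
  | _ :: cs, j => j :: rowZeroA cs (j + 1)

-- inner loop of A for j = 1..n on row i (ca = a[i-1]); cells j ≥ 1:
-- memo[i][j] = memo[i-1][j-1] if a[i-1]==b[j-1] else 1 + min(memo[i-1][j], memo[i][j-1])
def rowStepA (ca : Char) : List Char → List Int → Int → List Int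
  | cb :: cs, p0 :: p1 :: ps, left =>
      let v := if cb == ca then p0 else 1 + min p1 left
      v :: rowStepA ca cs (p1 :: ps) v
  | _, _, _ => []

-- outer loop of A for i = 1..m: appends row i to the matrix, reading row i-1 (the last row so far)
def matA (bs : List Char) : List Char → Int → List (List Int) → List (List Int)
  | [], _, acc => acc
  | ca :: as', i, acc =>
      matA bs as' (i + 1) (acc ++ [(i + 1) :: rowStepA ca bs (acc.getLastD []) (i + 1)])

def deletion_distance (a : String) (b : String) : Int :=
  ((matA b.toList a.toList 0 [rowZeroA b.toList 0]).getLastD []).getLastD 0  -- memo[m][n]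

-- ===== PORT B =====
-- inner pass of B: fold over zip(b, prev, prev[1:]) with state (left, reversed row-so-far);
-- left = diag + 1 if cb == ca else max(up, left); row.append(left)
def innerB (ca : Char) (st : Int × List Int) (t : Char × Int × Int) : Int × List Int :=
  let left := if t.1 == ca then t.2.1 + 1 else max t.2.2 st.1
  (left, left :: st.2)

def stepRowB (ca : Char) (bs : List Char) (prev : List Int) : List Int :=
  (((bs.zip (prev.zip prev.tail)).foldl (innerB ca) (0, [0])).2).reverse

def deletion_distance_alt (a : String) (b : String) : Int :=
  let fin := a.toList.foldl (fun prev ca => stepRowB ca b.toList prev)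
      (List.replicate (b.toList.length + 1) (0 : Int))
  (a.toList.length : Int) + (b.toList.length : Int) - 2 * fin.getLastD 0

-- ===== PRECONDITION & SPEC =====
def Spec_deletion_distance (a : String) (b : String) (out : Int) : Prop := out = deletion_distance_alt a b
instance (a : String) (b : String) (out : Int) : Decidable (Spec_deletion_distance a b out) := by unfold Spec_deletion_distance; infer_instance

-- ===== CLAIM (what is proved, stated in full; the proofs are below) =====
def Claim_equal_deletion_distance : Prop := ∀ (a : String) (b : String), Dom_deletion_distance a b → Spec_deletion_distance a b (deletion_distance a b)

-- ===== LEMMAS AND PROOFS =====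

-- recursive specification of B's inner fold (proof-only helper)
def rowRecB (ca : Char) : List Char → List Int → Int → List Int
  | cb :: cs, p0 :: p1 :: ps, left =>
      let v := if cb == ca then p0 + 1 else max p1 left
      v :: rowRecB ca cs (p1 :: ps) v
  | _, _, _ => []

-- recursive specification of B's outer fold (proof-only helper)
def rowsRecB (bs : List Char) : List Char → List Int → List Int
  | [], prev => prev
  | ca :: as', prev => rowsRecB bs as' (0 :: rowRecB ca bs prev 0)

theorem stepRowB_fold (ca : Char) :
    ∀ (bs : List Char) (prev : List Int) (left : Int) (acc : List Int),
      (((bs.zip (prev.zip prev.tail)).foldl (innerB ca) (left, acc)).2).reverse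
        = acc.reverse ++ rowRecB ca bs prev left := by
  intro bs
  induction bs with
  | nil => intro prev left acc; simp [rowRecB]
  | cons cb cs ih =>
      intro prev left acc
      match prev with
      | [] => simp [rowRecB]
      | [p0] => simp [rowRecB]
      | p0 :: p1 :: ps =>
          simp only [List.tail_cons, List.zip_cons_cons, List.foldl_cons]
          have hstep : innerB ca (left, acc) (cb, p0, p1)
              = ((if cb == ca then p0 + 1 else max p1 left),
                 (if cb == ca then p0 + 1 else max p1 left) :: acc) := rfl
          rw [hstep]
          have h := ih (p1 :: ps) (if cb == ca then p0 + 1 else max p1 left)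
            ((if cb == ca then p0 + 1 else max p1 left) :: acc)
          simp only [List.tail_cons] at h
          rw [h]
          simp [rowRecB]

theorem stepRowB_eq (ca : Char) (bs : List Char) (prev : List Int) :
    stepRowB ca bs prev = 0 :: rowRecB ca bs prev 0 := by
  unfold stepRowB
  rw [stepRowB_fold ca bs prev 0 [0]]
  rfl

theorem foldB_eq (bs : List Char) :
    ∀ (as' : List Char) (prev : List Int),
      as'.foldl (fun prev ca => stepRowB ca bs prev) prev = rowsRecB bs as' prev := by
  intro as'
  induction as' with
  | nil => intro prev; rfl
  | cons ca as' ih =>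
      intro prev
      simp only [List.foldl_cons, rowsRecB]
      rw [stepRowB_eq ca bs prev]
      exact ih _

theorem replicate_zero_eq : ∀ (cs : List Char),
    List.replicate (cs.length + 1) (0 : Int) = 0 :: (cs.map (fun _ => (0:Int))) := by
  intro cs
  induction cs with
  | nil => rfl
  | cons c cs ih => rw [List.length_cons, List.replicate_succ, ih, List.map_cons]

-- prev-row-only version of A's outer loop (matA keeps the whole matrix; only the last row matters)
def lastA (bs : List Char) : List Char → Int → List Int → List Int
  | [], _, prev => prev
  | ca :: as', i, prev => lastA bs as' (i + 1) ((i + 1) :: rowStepA ca bs prev (i + 1))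

theorem getLastD_append_singleton (acc : List (List Int)) (r : List Int) :
    ∀ (d : List Int), (acc ++ [r]).getLastD d = r := by
  induction acc with
  | nil => intro d; rfl
  | cons x xs ih => intro d; rw [List.cons_append, List.getLastD_cons]; exact ih x

theorem matA_last (bs : List Char) :
    ∀ (as' : List Char) (i : Int) (acc : List (List Int)) (r : List Int),
      (matA bs as' i (acc ++ [r])).getLastD [] = lastA bs as' i r := by
  intro as'
  induction as' with
  | nil => intro i acc r; simp [matA, lastA]
  | cons ca as' ih =>
      intro i acc r
      have h := ih (i + 1) (acc ++ [r])
        ((i + 1) :: rowStepA ca bs r (i + 1))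
      simpa [matA, lastA, getLastD_append_singleton, List.append_assoc] using h

-- pointwise relation: A-cell at column j of row i equals i + j - 2 * (B-cell there)
def PRel (i : Int) : Int → List Int → List Int → Prop
  | _, [], [] => True
  | j, x :: xs, y :: ys => x = i + j - 2 * y ∧ PRel i (j + 1) xs ys
  | _, _, _ => False

theorem rel_rowZero : ∀ (cs : List Char) (j : Int),
    PRel 0 j (rowZeroA cs j) (0 :: (cs.map (fun _ => (0:Int)))) := by
  intro cs
  induction cs with
  | nil => intro j; exact ⟨by omega, trivial⟩
  | cons c cs ih => intro j; exact ⟨by omega, ih (j + 1)⟩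

theorem rel_rowStep (i : Int) (ca : Char) :
    ∀ (cs : List Char) (pA pB : List Int) (lA lB j : Int),
      PRel i j pA pB → lA = (i + 1) + j - 2 * lB →
      PRel (i + 1) (j + 1) (rowStepA ca cs pA lA) (rowRecB ca cs pB lB) := by
  intro cs
  induction cs with
  | nil =>
      intro pA pB lA lB j h hl
      cases pA <;> cases pB <;> simp [rowStepA, rowRecB, PRel] at h ⊢
  | cons cb cs ih =>
      intro pA pB lA lB j h hl
      match pA, pB, h with
      | [], [], _ => trivial
      | [p0], [q0], _ => trivial
      | p0 :: p1 :: ps, q0 :: q1 :: qs, ⟨h0, h1, hrest⟩ =>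
          have hv : (if (cb == ca) = true then p0 else 1 + min p1 lA)
              = (i + 1) + (j + 1) - 2 * (if (cb == ca) = true then q0 + 1 else max q1 lB) := by
            by_cases hc : (cb == ca) = true
            · simp only [if_pos hc]; omega
            · simp only [if_neg hc]
              rcases le_total p1 lA with h' | h' <;> rcases le_total q1 lB with h'' | h'' <;>
                simp [h', h''] <;> omega
          exact ⟨hv, ih (p1 :: ps) (q1 :: qs) _ _ (j + 1) ⟨h1, hrest⟩ hv⟩
      | p0 :: p1 :: ps, [q0], h => exact absurd h.2 (by simp [PRel])
      | [p0], q0 :: q1 :: qs, h => exact absurd h.2 (by simp [PRel])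

theorem rel_rows (bs : List Char) :
    ∀ (as' : List Char) (i : Int) (pA pB : List Int),
      PRel i 0 pA pB →
      PRel (i + as'.length) 0 (lastA bs as' i pA) (rowsRecB bs as' pB) := by
  intro as'
  induction as' with
  | nil => intro i pA pB h; simpa [lastA, rowsRecB] using h
  | cons ca as' ih =>
      intro i pA pB h
      have hstep : PRel (i + 1) 0 ((i + 1) :: rowStepA ca bs pA (i + 1))
          (0 :: rowRecB ca bs pB 0) :=
        ⟨by omega, rel_rowStep i ca bs pA pB (i + 1) 0 0 h (by omega)⟩
      have := ih (i + 1) _ _ hstep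
      have harith : (i + 1) + (as'.length : Int) = i + ((ca :: as').length : Int) := by
        simp; omega
      simpa [lastA, rowsRecB, harith] using this

theorem rel_last :
    ∀ (xs ys : List Int) (i j : Int), PRel i j xs ys → xs ≠ [] →
      xs.getLastD 0 = i + (j + (xs.length : Int) - 1) - 2 * ys.getLastD 0 := by
  intro xs
  induction xs with
  | nil => intro ys i j h hne; exact absurd rfl hne
  | cons x xs ih =>
      intro ys i j h hne
      match ys, h with
      | y :: ys, ⟨h0, hrest⟩ =>
          cases xs with
          | nil =>
              cases ys with
              | nil => simpa using h0
              | cons y2 ys => exact absurd hrest (by simp [PRel])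
          | cons x2 xs' =>
              cases ys with
              | nil => exact absurd hrest (by simp [PRel])
              | cons y2 ys' =>
                  have := ih (y2 :: ys') i (j + 1) hrest (by simp)
                  simp only [List.getLastD_cons] at this ⊢
                  rw [this]; simp; omega

theorem len_rowStepA (ca : Char) :
    ∀ (cs : List Char) (pA : List Int) (l : Int),
      pA.length = cs.length + 1 → (rowStepA ca cs pA l).length = cs.length := by
  intro cs
  induction cs with
  | nil => intro pA l h; cases pA <;> simp [rowStepA]
  | cons cb cs ih =>
      intro pA l h
      match pA with
      | p0 :: p1 :: ps =>
          simp only [rowStepA, List.length_cons]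
          rw [ih (p1 :: ps) _ (by simpa using h)]
      | [p0] => simp at h
      | [] => simp at h

theorem len_lastA (bs : List Char) :
    ∀ (as' : List Char) (i : Int) (prev : List Int),
      prev.length = bs.length + 1 →
      (lastA bs as' i prev).length = bs.length + 1 := by
  intro as'
  induction as' with
  | nil => intro i prev h; simpa [lastA] using h
  | cons ca as' ih =>
      intro i prev h
      simp only [lastA]
      exact ih (i + 1) _ (by simp [len_rowStepA ca bs prev _ h])

theorem len_rowZeroA : ∀ (cs : List Char) (j : Int), (rowZeroA cs j).length = cs.length + 1 := by
  intro cs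
  induction cs with
  | nil => intro j; rfl
  | cons c cs ih => intro j; simp [rowZeroA, ih]

-- ===== VERDICT (by name: the statement is the Claim_ definition above) =====
theorem deletion_distance_spec : Claim_equal_deletion_distance := by
  unfold Claim_equal_deletion_distance
  intro a b _
  unfold Spec_deletion_distance deletion_distance deletion_distance_alt
  set as := a.toList with has
  set bs := b.toList with hbs
  have hmat : (matA bs as 0 ([] ++ [rowZeroA bs 0])).getLastD [] = lastA bs as 0 (rowZeroA bs 0) :=
    matA_last bs as 0 [] (rowZeroA bs 0)
  simp only [List.nil_append] at hmat
  rw [hmat]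
  rw [foldB_eq bs as _, replicate_zero_eq bs]
  have hrel : PRel (0 + (as.length : Int)) 0 (lastA bs as 0 (rowZeroA bs 0))
      (rowsRecB bs as (0 :: (bs.map (fun _ => (0:Int))))) :=
    rel_rows bs as 0 _ _ (rel_rowZero bs 0)
  have hlen : (lastA bs as 0 (rowZeroA bs 0)).length = bs.length + 1 :=
    len_lastA bs as 0 _ (len_rowZeroA bs 0)
  have hne : lastA bs as 0 (rowZeroA bs 0) ≠ [] := by
    intro hnil; rw [hnil] at hlen; simp at hlen
  have := rel_last _ _ _ _ hrel hne
  rw [this, hlen]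
  push_cast
  ring
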